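-- pv_equiv track=rewrite | github.com/moti9/iCode | cp/k_switchIn.py | min_steps_to_k_switching
-- ===== SOURCE A (Python) =====
-- def min_steps_to_k_switching(N, S):
--     # Find the factors of N
--     factors = [i for i in range(1, N+1) if N % i == 0]
--
--     min_steps = float('inf')
--
--     # Check each factor
--     for K in factors:
--         steps = 0
--         for i in range(N):
--             # Check if this position should be 0 or 1 based on K
--             if (i // K) % 2 == 0:
--                 if S[i] != '0':
--                     steps += 1
--             else:
--                 if S[i] != '1':
--                     steps += 1
--         min_steps = min(min_steps, steps)
--
--     return min_steps
-- ===== SOURCE B (Python) =====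
-- def min_steps_to_k_switching(N, S):
--     # Prefix sums: pre0[j] = # of chars != '0' among S[:j], pre1[j] likewise for '1'.
--     # Each divisor K is then charged O(N/K) block lookups instead of an O(N) scan.
--     T = S[:N]
--     pre0 = [0]
--     for ch in T:
--         pre0.append(pre0[-1] + (ch != '0'))
--     pre1 = [0]
--     for ch in T:
--         pre1.append(pre1[-1] + (ch != '1'))
--     best = None
--     for K in range(1, N + 1):
--         if N % K == 0:
--             cost = 0
--             for start in range(0, N, K):
--                 if (start // K) % 2 == 0:
--                     cost += pre0[start + K] - pre0[start]
--                 else: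
--                     cost += pre1[start + K] - pre1[start]
--             if best is None or cost < best:
--                 best = cost
--     return best
-- ===== Notes on version B (the rewrite author's own statement) =====
-- stated objective: alternative
-- what changed: B precomputes prefix sums of the two mismatch counts once and evaluates each divisor K block-by-block with O(N/K) prefix-sum lookups instead of rescanning all N positions per divisor.
-- outside the precondition, e.g. on min_steps_to_k_switching(0, ''): A returns inf, B returns None
import Mathlib
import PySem

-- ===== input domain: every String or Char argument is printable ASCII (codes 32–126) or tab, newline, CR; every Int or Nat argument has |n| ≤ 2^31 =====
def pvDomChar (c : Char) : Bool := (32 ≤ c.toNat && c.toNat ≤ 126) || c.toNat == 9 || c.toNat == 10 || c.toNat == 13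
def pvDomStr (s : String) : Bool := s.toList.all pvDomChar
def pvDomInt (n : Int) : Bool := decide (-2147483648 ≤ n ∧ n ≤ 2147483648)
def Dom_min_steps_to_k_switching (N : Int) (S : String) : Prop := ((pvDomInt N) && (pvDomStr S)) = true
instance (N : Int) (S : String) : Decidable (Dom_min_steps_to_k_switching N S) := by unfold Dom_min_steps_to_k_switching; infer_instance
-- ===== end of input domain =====

-- B replaces A's full per-divisor rescan by prefix sums of the two mismatch counts, evaluating
-- each divisor K block-by-block via O(N/K) prefix-sum lookups (objective: alternative).

-- ===== PORT A =====
def min_steps_to_k_switching (N : Int) (S : String) : Int :=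
  -- factors = [i for i in range(1, N+1) if N % i == 0]
  let factors := (PySem.List.pyRange 1 (N+1) 1).filter (fun i => PySem.Int.mod N i == 0)
  -- min_steps = inf (modelled as none); for K in factors: per-index scan, min_steps = min(...)
  let best := factors.foldl (fun (m : Option Int) K =>
      let steps := (PySem.List.pyRange 0 N 1).foldl (fun steps i =>
        if PySem.Int.mod (PySem.Int.floordiv i K) 2 == 0 then
          (if ((PySem.Str.pyGet? S i).getD '0') ≠ '0' then steps + 1 else steps)
        else
          (if ((PySem.Str.pyGet? S i).getD '1') ≠ '1' then steps + 1 else steps)) 0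
      match m with
      | none => some steps
      | some v => some (min v steps)) none
  best.getD 0

-- ===== PORT B =====
-- ch != '0' / ch != '1' as 0/1-valued functions
def pvF0 : Char → Int := fun c => if c ≠ '0' then 1 else 0
def pvF1 : Char → Int := fun c => if c ≠ '1' then 1 else 0

-- the 'for ch in T: pre.append(pre[-1] + (ch != c))' loop: append the running total for each char
def pvPre (f : Char → Int) : Int → List Char → List Int
  | a, [] => [a]
  | a, c :: cs => a :: pvPre f (a + f c) cs

def min_steps_to_k_switching_alt (N : Int) (S : String) : Int :=
  let T := (PySem.Str.slice S none (some N)).toList    -- T = S[:N]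
  let pre0 := pvPre pvF0 0 T
  let pre1 := pvPre pvF1 0 T
  let best := (PySem.List.pyRange 1 (N+1) 1).foldl (fun (m : Option Int) K =>
    if PySem.Int.mod N K == 0 then
      let cost := (PySem.List.pyRange 0 N K).foldl (fun cost start =>
        if PySem.Int.mod (PySem.Int.floordiv start K) 2 == 0 then
          cost + (PySem.List.pyGetD pre0 (start + K) 0 - PySem.List.pyGetD pre0 start 0)
        else
          cost + (PySem.List.pyGetD pre1 (start + K) 0 - PySem.List.pyGetD pre1 start 0)) 0
      match m with
      | none => some cost
      | some v => if cost < v then some cost else some v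
    else m) none
  best.getD 0

-- ===== PRECONDITION & SPEC =====
-- Pre_ excludes N < 1 (A returns float('inf'), not an int) and N > len(S) (A raises IndexError).
def Pre_min_steps_to_k_switching (N : Int) (S : String) : Prop :=
  1 ≤ N ∧ N ≤ (S.toList.length : Int)
instance (N : Int) (S : String) : Decidable (Pre_min_steps_to_k_switching N S) := by
  unfold Pre_min_steps_to_k_switching; infer_instance

def pvWitness_min_steps_to_k_switching : Int × String := (4, "0110")

def Spec_min_steps_to_k_switching (N : Int) (S : String) (out : Int) : Prop := out = min_steps_to_k_switching_alt N S
instance (N : Int) (S : String) (out : Int) : Decidable (Spec_min_steps_to_k_switching N S out) := by unfold Spec_min_steps_to_k_switching; infer_instance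

-- ===== CLAIM (what is proved, stated in full; the proofs are below) =====
def Claim_equal_min_steps_to_k_switching : Prop := ∀ (N : Int) (S : String), Dom_min_steps_to_k_switching N S → Pre_min_steps_to_k_switching N S → Spec_min_steps_to_k_switching N S (min_steps_to_k_switching N S)

-- ===== LEMMAS AND PROOFS =====

-- per-index contribution of A's inner scan
def pvG (S : String) (K i : Int) : Int :=
  if PySem.Int.mod (PySem.Int.floordiv i K) 2 == 0 then
    (if ((PySem.Str.pyGet? S i).getD '0') ≠ '0' then 1 else 0)
  else
    (if ((PySem.Str.pyGet? S i).getD '1') ≠ '1' then 1 else 0)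

-- per-block contribution of B's inner loop
def pvH (pre0 pre1 : List Int) (K s : Int) : Int :=
  if PySem.Int.mod (PySem.Int.floordiv s K) 2 == 0 then
    PySem.List.pyGetD pre0 (s + K) 0 - PySem.List.pyGetD pre0 s 0
  else
    PySem.List.pyGetD pre1 (s + K) 0 - PySem.List.pyGetD pre1 s 0

lemma pvPre_getD (f : Char → Int) (acc : Int) (T : List Char) (j : Nat) (hj : j ≤ T.length) :
    (pvPre f acc T).getD j 0 = acc + ((T.take j).map f).sum := by
  induction T generalizing acc j with
  | nil =>
    have : j = 0 := by simpa using hj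
    subst this; simp [pvPre]
  | cons c cs ih =>
    cases j with
    | zero => simp [pvPre]
    | succ j =>
      simp only [pvPre, List.getD_cons_succ, List.take_succ_cons, List.map_cons, List.sum_cons]
      rw [ih _ j (by simpa using hj)]; ring

lemma pvPre_pyGetD (f : Char → Int) (T : List Char) (i : Int) (h0 : 0 ≤ i) (h1 : i ≤ (T.length : Int)) :
    PySem.List.pyGetD (pvPre f 0 T) i 0 = ((T.take i.toNat).map f).sum := by
  have : i = ((i.toNat : Nat) : Int) := by omega
  rw [this, PySem.List.pyGetD_natCast, pvPre_getD _ _ _ _ (by omega)]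
  have h2 : ((i.toNat : Nat) : Int).toNat = i.toNat := by omega
  rw [zero_add, h2]

lemma pvRangeMul (K : Int) (hK : 0 < K) (m : Nat) :
    PySem.List.pyRange 0 ((m : Int) * K) K = (List.range m).map (fun j : Nat => (j : Int) * K) := by
  rw [PySem.List.pyRange_of_pos _ _ hK]
  rcases Nat.eq_zero_or_pos m with hm | hm
  · subst hm; simp
  · have hpos : (0 : Int) < (m : Int) * K := by positivity
    rw [if_pos (by simpa using hpos)]
    have hdiv : (((m : Int) * K - 0 + K - 1) / K) = (m : Int) := by
      have h1 : (m : Int) * K - 0 + K - 1 = (K - 1) + (m : Int) * K := by ring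
      rw [h1, Int.add_mul_ediv_right _ _ (by omega), Int.ediv_eq_zero_of_lt (by omega) (by omega)]
      ring
    rw [hdiv, Int.toNat_natCast]
    exact List.map_congr_left (fun k _ => by ring)

lemma pvRangeSum (S : String) (f : Char → Int) (d : Char) (a k : Nat)
    (h : a + k ≤ S.toList.length) :
    ((PySem.List.pyRange (a : Int) ((a : Int) + (k : Int)) 1).map
        (fun i => f ((PySem.Str.pyGet? S i).getD d))).sum
      = (((S.toList.drop a).take k).map f).sum := by
  rw [PySem.List.pyRange_one]
  have h1 : (((a : Int) + (k : Int)) - (a : Int)).toNat = k := by omega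
  rw [h1, List.map_map]
  congr 1
  apply List.ext_getElem
  · simp only [List.length_map, List.length_range, List.length_take, List.length_drop]
    omega
  · intro j hj hj'
    simp only [List.getElem_map, List.getElem_range, Function.comp_apply]
    have hj2 : j < k := by simpa using hj
    have hcast : (a : Int) + (j : Int) = ((a + j : Nat) : Int) := by push_cast; ring
    rw [hcast, PySem.Str.pyGet?_natCast]
    have hlt : a + j < S.toList.length := by omega
    rw [List.getElem?_eq_getElem hlt]
    simp only [Option.getD_some]
    congr 1
    rw [List.getElem_take, List.getElem_drop]

lemma pvBlockDiff (f : Char → Int) (T : List Char) (a k : Nat) :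
    ((T.take (a + k)).map f).sum - ((T.take a).map f).sum = (((T.drop a).take k).map f).sum := by
  rw [List.take_add, List.map_append, List.sum_append]; ring

-- one block: the K per-index contributions starting at m*K collapse to one prefix-sum difference
lemma pvBlockEq (S : String) (K M : Int) (hK : 0 < K)
    (hM : M ≤ (S.toList.length : Int)) (m : Nat) (hm : ((m : Int) + 1) * K ≤ M) :
    ((PySem.List.pyRange ((m : Int) * K) (((m : Int) + 1) * K) 1).map (pvG S K)).sum
      = pvH (pvPre pvF0 0 (S.toList.take M.toNat)) (pvPre pvF1 0 (S.toList.take M.toNat)) K ((m : Int) * K) := by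
  have hx0 : (0 : Int) ≤ (m : Int) * K := by positivity
  set a : Nat := ((m : Int) * K).toNat with ha
  set k : Nat := K.toNat with hk
  have hTlen : (S.toList.take M.toNat).length = M.toNat := by
    rw [List.length_take]; omega
  have hcast1 : ((m : Int) * K) = ((a : Nat) : Int) := by omega
  have hcast2 : (((m : Int)) + 1) * K = ((a : Nat) : Int) + ((k : Nat) : Int) := by
    have : ((m : Int) + 1) * K = (m : Int) * K + K := by ring
    omega
  have hmK' : (m : Int) * K + K ≤ M := by nlinarith
  have hsum : a + k ≤ M.toNat := by omega
  have haklen : a + k ≤ S.toList.length := by omega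
  have hdivm : PySem.Int.floordiv ((m : Int) * K) K = (m : Int) := by
    rw [PySem.Int.floordiv_eq_iff_of_pos hK]
    constructor <;> nlinarith
  have hdiff : ∀ f : Char → Int,
      PySem.List.pyGetD (pvPre f 0 (S.toList.take M.toNat)) ((m : Int) * K + K) 0
        - PySem.List.pyGetD (pvPre f 0 (S.toList.take M.toNat)) ((m : Int) * K) 0
      = (((S.toList.drop a).take k).map f).sum := by
    intro f
    rw [pvPre_pyGetD f _ _ (by omega) (by rw [hTlen]; omega),
        pvPre_pyGetD f _ _ (by omega) (by rw [hTlen]; omega)]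
    have h1 : ((m : Int) * K + K).toNat = a + k := by omega
    have h2 : ((m : Int) * K).toNat = a := by omega
    rw [h1, h2, pvBlockDiff f _ a k, List.drop_take, List.take_take]
    have hmin : min k (M.toNat - a) = k := by omega
    rw [hmin]
  have hmod : PySem.Int.mod ((m : Int)) 2 = (((m % 2 : Nat) : Nat) : Int) := by
    exact_mod_cast PySem.Int.mod_natCast m 2
  by_cases hpar : m % 2 = 0
  · have hb : (PySem.Int.mod ((m : Int)) 2 == 0) = true := by
      rw [hmod, hpar]; rfl
    have hL : ((PySem.List.pyRange ((m : Int) * K) (((m : Int) + 1) * K) 1).map (pvG S K)).sum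
        = (((S.toList.drop a).take k).map pvF0).sum := by
      have hmap : (PySem.List.pyRange ((m : Int) * K) (((m : Int) + 1) * K) 1).map (pvG S K)
          = (PySem.List.pyRange ((m : Int) * K) (((m : Int) + 1) * K) 1).map
              (fun i => pvF0 ((PySem.Str.pyGet? S i).getD '0')) := by
        apply List.map_congr_left
        intro i hi
        rw [PySem.List.mem_pyRange_one] at hi
        have hdiv : PySem.Int.floordiv i K = (m : Int) := by
          rw [PySem.Int.floordiv_eq_iff_of_pos hK]
          exact ⟨hi.1, hi.2⟩
        simp only [pvG, hdiv, hb]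
        simp [pvF0]
      rw [hmap, hcast1, hcast2, pvRangeSum S pvF0 '0' a k haklen]
    rw [hL]
    simp only [pvH, hdivm, hb]
    rw [if_pos trivial, hdiff pvF0]
  · have hb : (PySem.Int.mod ((m : Int)) 2 == 0) = false := by
      have h2 : m % 2 = 1 := by omega
      rw [hmod, h2]; rfl
    have hL : ((PySem.List.pyRange ((m : Int) * K) (((m : Int) + 1) * K) 1).map (pvG S K)).sum
        = (((S.toList.drop a).take k).map pvF1).sum := by
      have hmap : (PySem.List.pyRange ((m : Int) * K) (((m : Int) + 1) * K) 1).map (pvG S K)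
          = (PySem.List.pyRange ((m : Int) * K) (((m : Int) + 1) * K) 1).map
              (fun i => pvF1 ((PySem.Str.pyGet? S i).getD '1')) := by
        apply List.map_congr_left
        intro i hi
        rw [PySem.List.mem_pyRange_one] at hi
        have hdiv : PySem.Int.floordiv i K = (m : Int) := by
          rw [PySem.Int.floordiv_eq_iff_of_pos hK]
          exact ⟨hi.1, hi.2⟩
        simp only [pvG, hdiv, hb]
        simp [pvF1]
      rw [hmap, hcast1, hcast2, pvRangeSum S pvF1 '1' a k haklen]
    rw [hL]
    simp only [pvH, hdivm, hb]
    simp only [Bool.false_eq_true, if_false]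
    rw [hdiff pvF1]

-- main block decomposition: A's per-index sum over [0, m*K) equals B's per-block sum
lemma pvBlocks (S : String) (K M : Int) (hK : 0 < K)
    (hM : M ≤ (S.toList.length : Int)) (m : Nat) (hm : (m : Int) * K ≤ M) :
    ((PySem.List.pyRange 0 ((m : Int) * K) 1).map (pvG S K)).sum
      = ((PySem.List.pyRange 0 ((m : Int) * K) K).map
          (pvH (pvPre pvF0 0 (S.toList.take M.toNat)) (pvPre pvF1 0 (S.toList.take M.toNat)) K)).sum := by
  induction m with
  | zero =>
    have h0 : ((0 : Nat) : Int) * K = 0 := by simp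
    rw [h0]
    have h1 := pvRangeMul K hK 0
    rw [h0] at h1
    rw [h1]
    simp [PySem.List.pyRange_one_eq_nil (le_refl (0 : Int))]
  | succ m ih =>
    have hmK : (m : Int) * K ≤ ((m : Int) + 1) * K := by nlinarith
    have hm' : (m : Int) * K ≤ M := by push_cast at hm; nlinarith
    have hsucc : ((m + 1 : Nat) : Int) = (m : Int) + 1 := by push_cast; ring
    rw [hsucc]
    rw [PySem.List.pyRange_one_append 0 ((m : Int) * K) (((m : Int) + 1) * K)
          (by positivity) hmK,
        List.map_append, List.sum_append]
    have hr : PySem.List.pyRange 0 (((m : Int) + 1) * K) K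
        = PySem.List.pyRange 0 ((m : Int) * K) K ++ [(m : Int) * K] := by
      rw [← hsucc, pvRangeMul K hK (m + 1), pvRangeMul K hK m, List.range_succ, List.map_append]
      simp
    rw [hr, List.map_append, List.sum_append]
    rw [ih hm', pvBlockEq S K M hK hM m (by rw [← hsucc]; exact hm)]
    simp

-- inner loops equal, for a divisor K of N
lemma pvInner (S : String) (N K : Int) (hK : 1 ≤ K) (hdvd : K ∣ N) (h0 : 0 ≤ N)
    (hlen : N ≤ (S.toList.length : Int)) :
    ((PySem.List.pyRange 0 N 1).map (pvG S K)).sum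
      = ((PySem.List.pyRange 0 N K).map
          (pvH (pvPre pvF0 0 (S.toList.take N.toNat)) (pvPre pvF1 0 (S.toList.take N.toNat)) K)).sum := by
  obtain ⟨c, hc⟩ := hdvd
  have hc0 : 0 ≤ c := by nlinarith
  have hct : ((c.toNat : Nat) : Int) = c := by omega
  have hNm : N = ((c.toNat : Nat) : Int) * K := by rw [hct, hc, mul_comm]
  rw [hNm]
  exact pvBlocks S K (((c.toNat : Nat) : Int) * K) hK (hNm ▸ hlen) c.toNat le_rfl

-- A's inner per-index scan is the sum of pvG over the index range
lemma pvInnerA (S : String) (N K : Int) :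
    (PySem.List.pyRange 0 N 1).foldl (fun steps i =>
      if PySem.Int.mod (PySem.Int.floordiv i K) 2 == 0 then
        (if ((PySem.Str.pyGet? S i).getD '0') ≠ '0' then steps + 1 else steps)
      else
        (if ((PySem.Str.pyGet? S i).getD '1') ≠ '1' then steps + 1 else steps)) 0
    = ((PySem.List.pyRange 0 N 1).map (pvG S K)).sum := by
  rw [PySem.List.foldl_congr_mem _ _ (fun s i => s + pvG S K i) 0
      (by intro acc x _; simp only [pvG]; split_ifs <;> omega)]
  rw [PySem.List.foldl_add]
  ring

-- B's inner per-block loop is the sum of pvH over the block starts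
lemma pvInnerB (pre0 pre1 : List Int) (N K : Int) :
    (PySem.List.pyRange 0 N K).foldl (fun cost start =>
      if PySem.Int.mod (PySem.Int.floordiv start K) 2 == 0 then
        cost + (PySem.List.pyGetD pre0 (start + K) 0 - PySem.List.pyGetD pre0 start 0)
      else
        cost + (PySem.List.pyGetD pre1 (start + K) 0 - PySem.List.pyGetD pre1 start 0)) 0
    = ((PySem.List.pyRange 0 N K).map (pvH pre0 pre1 K)).sum := by
  rw [PySem.List.foldl_congr_mem _ _ (fun c s => c + pvH pre0 pre1 K s) 0
      (by intro acc x _; simp only [pvH]; split_ifs <;> ring)]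
  rw [PySem.List.foldl_add]
  ring

-- ===== VERDICT (by name: the statement is the Claim_ definition above) =====
theorem min_steps_to_k_switching_spec : Claim_equal_min_steps_to_k_switching := by
  intro N S hdom hpre
  obtain ⟨hN1, hNlen⟩ := hpre
  unfold Spec_min_steps_to_k_switching
  simp only [min_steps_to_k_switching, min_steps_to_k_switching_alt]
  have hT : (PySem.Str.slice S none (some N)).toList = S.toList.take N.toNat := by
    rw [PySem.Str.toList_slice]
    exact PySem.List.slice_to _ (by omega)
  rw [hT]
  rw [PySem.List.foldl_if_eq_foldl_filter]
  congr 1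
  apply PySem.List.foldl_congr_mem
  intro acc K hK
  rw [List.mem_filter] at hK
  obtain ⟨hKmem, hKdvd⟩ := hK
  rw [PySem.List.mem_pyRange_one] at hKmem
  have hK1 : 1 ≤ K := hKmem.1
  have hdvd : K ∣ N := by
    rw [← PySem.Int.mod_eq_zero_iff_dvd]
    simpa using hKdvd
  rw [pvInnerA S N K, pvInnerB _ _ N K,
      pvInner S N K hK1 hdvd (by omega) hNlen]
  cases acc with
  | none => rfl
  | some v =>
    dsimp only
    rcases lt_or_ge (((PySem.List.pyRange 0 N K).map
        (pvH (pvPre pvF0 0 (S.toList.take N.toNat)) (pvPre pvF1 0 (S.toList.take N.toNat)) K)).sum) v with h | h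
    · rw [if_pos h, min_eq_right (le_of_lt h)]
    · rw [if_neg (not_lt.mpr h), min_eq_left h]
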